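-- pv_equiv track=rewrite | github.com/EiffL/GalSim | galsim/deepgen/layers/merge.py | get_output_shape_for
-- ===== SOURCE A (Python) =====
-- def get_output_shape_for(input_shapes):
--     # Infer the output shape by grabbing, for each axis, the first
--     # input size that is not `None` (if there is any)
--     output_shape = tuple(next((s for s in sizes if s is not None), None)
--                          for sizes in zip(*input_shapes))
--
--     def match(shape1, shape2):
--         return (len(shape1) == len(shape2) and
--                 all(s1 is None or s2 is None or s1 == s2
--                     for s1, s2 in zip(shape1, shape2)))
--
--     # Check for compatibility with inferred output shape
--     if not all(match(shape, output_shape) for shape in input_shapes):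
--         raise ValueError("Mismatch: not all input shapes are the same")
--     return output_shape
-- ===== SOURCE B (Python) =====
-- def get_output_shape_for(input_shapes):
--     # Single fused pass: validate lengths, then merge axis sizes while checking.
--     if not input_shapes:
--         return ()
--     n = len(input_shapes[0])
--     if any(len(shape) != n for shape in input_shapes[1:]):
--         raise ValueError("Mismatch: not all input shapes are the same")
--     out = [None] * n
--     for shape in input_shapes:
--         for i, s in enumerate(shape):
--             if s is None:
--                 continue
--             if out[i] is None:
--                 out[i] = s
--             elif out[i] != s:
--                 raise ValueError("Mismatch: not all input shapes are the same")
--     return tuple(out)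
-- ===== Notes on version B (the rewrite author's own statement) =====
-- stated objective: alternative
-- what changed: Replaced A's two-pass structure (transpose via zip + first-non-None per column, then a separate validation pass matching every shape against the inferred output) with one fused pass that first checks all lengths agree and then folds the shapes into a running per-axis merged value, raising immediately on a conflicting non-None size.
import Mathlib
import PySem

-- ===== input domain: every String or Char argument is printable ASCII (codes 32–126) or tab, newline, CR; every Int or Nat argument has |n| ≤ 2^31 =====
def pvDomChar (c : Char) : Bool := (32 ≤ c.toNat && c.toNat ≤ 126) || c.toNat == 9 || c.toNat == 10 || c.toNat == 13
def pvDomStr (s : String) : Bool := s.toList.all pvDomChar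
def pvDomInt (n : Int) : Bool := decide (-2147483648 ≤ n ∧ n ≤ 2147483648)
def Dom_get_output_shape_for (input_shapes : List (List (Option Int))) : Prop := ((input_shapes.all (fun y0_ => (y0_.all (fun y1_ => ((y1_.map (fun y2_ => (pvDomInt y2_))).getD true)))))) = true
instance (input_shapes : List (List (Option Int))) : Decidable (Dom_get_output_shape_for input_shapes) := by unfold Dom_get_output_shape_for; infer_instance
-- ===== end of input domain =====

-- B replaces A's two passes (transpose+infer, then validate) by one fused per-axis merging
-- fold; return values proved equal on Pre_ (inputs where A does not raise ValueError).

-- ===== PORT A =====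
-- next((s for s in sizes if s is not None), None)
def pyFirstSome (sizes : List (Option Int)) : Option Int :=
  (sizes.find? Option.isSome).getD none

-- zip(*input_shapes): columns, truncated to the shortest row (empty for no rows)
def pyZipStar (ls : List (List (Option Int))) : List (List (Option Int)) :=
  if ls.isEmpty then []
  else
    let m := ls.foldl (fun a r => min a r.length) (ls.headD []).length
    (List.range m).map (fun i => ls.map (fun r => r.getD i none))

def matchShape (shape1 shape2 : List (Option Int)) : Bool :=
  shape1.length == shape2.length &&
    (shape1.zip shape2).all (fun p => p.1 == none || p.2 == none || p.1 == p.2)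

def get_output_shape_for (input_shapes : List (List (Option Int))) : List (Option Int) :=
  let output_shape := (pyZipStar input_shapes).map pyFirstSome
  if input_shapes.all (fun shape => matchShape shape output_shape) then output_shape
  else []  -- Python raises ValueError here; excluded by Pre_

-- ===== PORT B =====
-- the inner 'for i, s in enumerate(shape)' loop updating out; none = the ValueError raise
def mergeRow : List (Option Int) → List (Option Int) → Option (List (Option Int))
  | [], _ => some []
  | a :: as, [] => some (a :: as)          -- unreachable: lengths were checked equal
  | a :: as, s :: ss =>
    let head : Option (Option Int) :=
      match s, a with
      | none, _ => some a
      | some v, none => some (some v)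
      | some v, some w => if w = v then some a else none
    match head, mergeRow as ss with
    | some h, some t => some (h :: t)
    | _, _ => none

def get_output_shape_for_alt (input_shapes : List (List (Option Int))) : List (Option Int) :=
  match input_shapes with
  | [] => []
  | first :: rest =>
    if rest.any (fun shape => shape.length ≠ first.length) then []  -- raise ValueError
    else
      ((first :: rest).foldl (fun acc shape => acc.bind (fun a => mergeRow a shape))
        (some (List.replicate first.length (none : Option Int)))).getD []

-- ===== PRECONDITION & SPEC =====
-- Pre_ excludes exactly the inputs on which A raises ValueError: some row has a different
-- length than the first, or two rows carry conflicting non-None sizes at the same axis.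
def Pre_get_output_shape_for (input_shapes : List (List (Option Int))) : Prop :=
  (∀ r ∈ input_shapes, r.length = (input_shapes.headD []).length) ∧
  (∀ r ∈ input_shapes, ∀ s ∈ input_shapes, ∀ p ∈ r.zip s,
      p.1 = none ∨ p.2 = none ∨ p.1 = p.2)
instance (input_shapes : List (List (Option Int))) : Decidable (Pre_get_output_shape_for input_shapes) := by unfold Pre_get_output_shape_for; infer_instance

def pvWitness_get_output_shape_for : List (List (Option Int)) :=
  [[some 3, none, some 2], [none, none, some 2], [some 3, none, none]]

def Spec_get_output_shape_for (input_shapes : List (List (Option Int))) (out : List (Option Int)) : Prop := out = get_output_shape_for_alt input_shapes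
instance (input_shapes : List (List (Option Int))) (out : List (Option Int)) : Decidable (Spec_get_output_shape_for input_shapes out) := by unfold Spec_get_output_shape_for; infer_instance

-- ===== CLAIM (what is proved, stated in full; the proofs are below) =====
def Claim_equal_get_output_shape_for : Prop := ∀ (input_shapes : List (List (Option Int))), Dom_get_output_shape_for input_shapes → Pre_get_output_shape_for input_shapes → Spec_get_output_shape_for input_shapes (get_output_shape_for input_shapes)

-- ===== LEMMAS AND PROOFS =====

-- the first non-None size of column i, scanning the rows in order
def colFirst (ls : List (List (Option Int))) (i : Nat) : Option Int :=
  pyFirstSome (ls.map (fun r => r.getD i none))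

-- index form of the per-pair compatibility condition
def CompI (a b : List (Option Int)) : Prop :=
  ∀ i (h1 : i < a.length) (h2 : i < b.length), a[i] = none ∨ b[i] = none ∨ a[i] = b[i]

theorem pyFirstSome_cons (x : Option Int) (xs : List (Option Int)) :
    pyFirstSome (x :: xs) = x.or (pyFirstSome xs) := by
  cases x <;> simp [pyFirstSome, List.find?, Option.or]

theorem zip_forall_iff {α β : Type} (P : α × β → Prop) (a : List α) (b : List β) :
    (∀ p ∈ a.zip b, P p) ↔ ∀ i (h1 : i < a.length) (h2 : i < b.length), P (a[i], b[i]) := by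
  constructor
  · intro h i h1 h2
    apply h
    have hi : i < (a.zip b).length := by simp [List.length_zip]; omega
    have hmem := List.getElem_mem hi
    rwa [List.getElem_zip] at hmem
  · intro h p hp
    obtain ⟨i, hi, rfl⟩ := List.mem_iff_getElem.1 hp
    rw [List.getElem_zip]
    exact h i (by simp [List.length_zip] at hi; omega) (by simp [List.length_zip] at hi; omega)

theorem minfold (ls : List (List (Option Int))) (n : Nat) (h : ∀ r ∈ ls, r.length = n) :
    ls.foldl (fun a r => min a r.length) n = n := by
  induction ls with
  | nil => rfl
  | cons r rs ih =>
    simp only [List.foldl_cons, h r List.mem_cons_self, Nat.min_self]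
    exact ih (fun r' hr' => h r' (List.mem_cons_of_mem _ hr'))

theorem colFirst_mem {ls : List (List (Option Int))} {i : Nat} {w : Int}
    (h : colFirst ls i = some w) : ∃ r ∈ ls, r.getD i none = some w := by
  unfold colFirst pyFirstSome at h
  cases hf : (ls.map (fun r => r.getD i none)).find? Option.isSome with
  | none => rw [hf] at h; simp at h
  | some o =>
    rw [hf] at h
    simp only [Option.getD_some] at h
    subst h
    exact List.mem_map.1 (List.mem_of_find?_eq_some hf)

theorem A_eq (ls : List (List (Option Int))) (n : Nat) (hne : ls ≠ [])
    (hlen : ∀ r ∈ ls, r.length = n) (hn : (ls.headD []).length = n)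
    (hcomp : ∀ r ∈ ls, ∀ s ∈ ls, CompI r s) :
    get_output_shape_for ls = (List.range n).map (fun i => colFirst ls i) := by
  have hzip : pyZipStar ls = (List.range n).map (fun i => ls.map (fun r => r.getD i none)) := by
    unfold pyZipStar
    rw [if_neg (by simpa [List.isEmpty_iff] using hne)]
    rw [hn, minfold ls n hlen]
  have hout : (pyZipStar ls).map pyFirstSome = (List.range n).map (fun i => colFirst ls i) := by
    rw [hzip, List.map_map]; rfl
  have hall : ls.all
      (fun shape => matchShape shape ((List.range n).map (fun i => colFirst ls i))) = true := by
    rw [List.all_eq_true]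
    intro s hs
    unfold matchShape
    rw [Bool.and_eq_true]
    refine ⟨by simp [hlen s hs], ?_⟩
    rw [List.all_eq_true, zip_forall_iff]
    intro i h1 h2
    have hilt : i < n := by simpa using h2
    simp only [List.getElem_map, List.getElem_range]
    cases hs1 : s[i] with
    | none => simp
    | some v =>
      cases ho : colFirst ls i with
      | none => simp
      | some w =>
        obtain ⟨r, hr, hgd⟩ := colFirst_mem ho
        have hrlen : i < r.length := by rw [hlen r hr]; exact hilt
        rw [List.getD_eq_getElem _ _ hrlen] at hgd
        rcases hcomp r hr s hs i hrlen h1 with hx | hx | hx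
        · rw [hgd] at hx; exact absurd hx (by simp)
        · rw [hs1] at hx; exact absurd hx (by simp)
        · rw [hgd, hs1] at hx
          injection hx with hvw
          simp [hvw]
  show (if ls.all (fun shape => matchShape shape ((pyZipStar ls).map pyFirstSome))
        then (pyZipStar ls).map pyFirstSome else []) = _
  rw [hout, if_pos hall]

theorem mergeRow_or (a : List (Option Int)) : ∀ (s : List (Option Int)),
    a.length = s.length → CompI a s →
    mergeRow a s = some (List.zipWith Option.or a s) := by
  induction a with
  | nil =>
    intro s hl _
    cases s with
    | nil => rfl
    | cons y ys => simp at hl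
  | cons x xs ih =>
    intro s hl hc
    cases s with
    | nil => simp at hl
    | cons y ys =>
      have htail : CompI xs ys := by
        intro i h1 h2
        have := hc (i + 1) (by simpa using h1) (by simpa using h2)
        simpa using this
      have hrec := ih ys (by simpa using hl) htail
      cases y with
      | none => cases x <;> simp [mergeRow, hrec, Option.or]
      | some v =>
        cases x with
        | none => simp [mergeRow, hrec, Option.or]
        | some w =>
          rcases hc 0 (by simp) (by simp) with h | h | h
          · exact absurd h (by simp)
          · exact absurd h (by simp)
          · simp only [List.getElem_cons_zero] at h
            injection h with hwv
            simp [mergeRow, hwv, hrec, Option.or]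

theorem foldB (rows : List (List (Option Int))) : ∀ (acc : List (Option Int)),
    (∀ r ∈ rows, r.length = acc.length) →
    (∀ r ∈ rows, CompI acc r) →
    (∀ r ∈ rows, ∀ s ∈ rows, CompI r s) →
    rows.foldl (fun ac shape => ac.bind (fun a => mergeRow a shape)) (some acc)
      = some (rows.foldl (fun a r => List.zipWith Option.or a r) acc) := by
  induction rows with
  | nil => intro acc _ _ _; rfl
  | cons r rs ih =>
    intro acc hlen hacc hcomp
    have hr0 : r.length = acc.length := hlen r List.mem_cons_self
    have hstep : mergeRow acc r = some (List.zipWith Option.or acc r) :=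
      mergeRow_or acc r hr0.symm (hacc r List.mem_cons_self)
    have hacclen : (List.zipWith Option.or acc r).length = acc.length := by
      simp [List.length_zipWith, hr0]
    simp only [List.foldl_cons, Option.bind_some, hstep]
    apply ih
    · intro r' hr'
      rw [hacclen]; exact hlen r' (List.mem_cons_of_mem _ hr')
    · intro r' hr' i h1 h2
      have hia : i < acc.length := by omega
      have hir : i < r.length := by omega
      have hzw : (List.zipWith Option.or acc r)[i]'h1 = (acc[i]'hia).or (r[i]'hir) :=
        List.getElem_zipWith
      rw [hzw]
      cases ha : acc[i]'hia with
      | none =>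
        simp only [Option.none_or]
        exact hcomp r List.mem_cons_self r' (List.mem_cons_of_mem _ hr') i hir h2
      | some w =>
        have := hacc r' (List.mem_cons_of_mem _ hr') i hia h2
        rw [ha] at this
        simpa using this
    · intro r' hr' s' hs'
      exact hcomp r' (List.mem_cons_of_mem _ hr') s' (List.mem_cons_of_mem _ hs')

theorem orFold (rows : List (List (Option Int))) : ∀ (acc : List (Option Int)),
    (∀ r ∈ rows, r.length = acc.length) →
    rows.foldl (fun a r => List.zipWith Option.or a r) acc
      = (List.range acc.length).map (fun i => (acc.getD i none).or (colFirst rows i)) := by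
  induction rows with
  | nil =>
    intro acc _
    apply List.ext_getElem (by simp)
    intro i h1 h2
    have hi : i < acc.length := by simpa using h1
    simp [colFirst, pyFirstSome, List.getElem?_eq_getElem hi]
  | cons r rs ih =>
    intro acc hlen
    have hr0 : r.length = acc.length := hlen r List.mem_cons_self
    have hacclen : (List.zipWith Option.or acc r).length = acc.length := by
      simp [List.length_zipWith, hr0]
    simp only [List.foldl_cons]
    rw [ih (List.zipWith Option.or acc r)
        (fun r' hr' => by rw [hacclen]; exact hlen r' (List.mem_cons_of_mem _ hr'))]
    rw [hacclen]
    apply List.map_congr_left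
    intro i hi
    have hia : i < acc.length := List.mem_range.1 hi
    have hir : i < r.length := by omega
    have hgl : i < (List.zipWith Option.or acc r).length := by omega
    have h1 : (List.zipWith Option.or acc r).getD i none
        = (acc.getD i none).or (r.getD i none) := by
      rw [List.getD_eq_getElem _ _ hgl, List.getElem_zipWith,
        List.getD_eq_getElem _ _ hia, List.getD_eq_getElem _ _ hir]
    have h2 : colFirst (r :: rs) i = (r.getD i none).or (colFirst rs i) := by
      simp [colFirst, List.map_cons, pyFirstSome_cons]
    rw [h1, h2, Option.or_assoc]

-- ===== VERDICT (by name: the statement is the Claim_ definition above) =====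
theorem get_output_shape_for_spec : Claim_equal_get_output_shape_for := by
  intro ls _hdom hpre
  obtain ⟨hlen0, hcomp0⟩ := hpre
  unfold Spec_get_output_shape_for
  cases ls with
  | nil => rfl
  | cons first rest =>
    have hn : ∀ r ∈ first :: rest, r.length = first.length := by
      intro r hr
      simpa using hlen0 r hr
    have hcomp : ∀ r ∈ first :: rest, ∀ s ∈ first :: rest, CompI r s := by
      intro r hr s hs i hi1 hi2
      exact (zip_forall_iff (fun p => p.1 = none ∨ p.2 = none ∨ p.1 = p.2) r s).1
        (hcomp0 r hr s hs) i hi1 hi2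
    rw [A_eq (first :: rest) first.length (by simp) hn (by simp) hcomp]
    show _ = get_output_shape_for_alt (first :: rest)
    simp only [get_output_shape_for_alt]
    rw [if_neg (by simp; intro s hs; exact hn s (List.mem_cons_of_mem _ hs))]
    rw [foldB (first :: rest) (List.replicate first.length none)
        (by intro r hr; simp [hn r hr])
        (by intro r hr i hi1 hi2; left; simp)
        hcomp]
    rw [Option.getD_some]
    rw [orFold (first :: rest) (List.replicate first.length none)
        (by intro r hr; simp [hn r hr])]
    simp
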